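-- pv_equiv track=rewrite | github.com/leifwritescode/Advent | event-24/5.12.2024.py | split_rules_and_updates
-- ===== SOURCE A (Python) =====
-- def split_rules_and_updates(lines):
--     rules = []
--     updates = []
--     is_update_section = False
--
--     for line in lines:
--         if '|' in line:  # It's a rule
--             if not is_update_section:
--                 rules.append(line)
--         elif line == '':
--             continue
--         else:  # It's an update
--             is_update_section = True
--             updates.append(line)
--
--     return rules, updates
-- ===== SOURCE B (Python) =====
-- def split_rules_and_updates(lines):
--     updates = [l for l in lines if l != '' and '|' not in l]
--     cut = next((i for i, l in enumerate(lines) if l != '' and '|' not in l), len(lines))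
--     rules = [l for l in lines[:cut] if '|' in l]
--     return rules, updates
-- ===== Notes on version B (the rewrite author's own statement) =====
-- stated objective: simpler
-- what changed: Replaced the single stateful loop with a flag by two independent passes: updates is a filter over all lines, and rules filters only the prefix before the first update line (explicit cutoff index instead of the is_update_section flag).
import Mathlib
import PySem

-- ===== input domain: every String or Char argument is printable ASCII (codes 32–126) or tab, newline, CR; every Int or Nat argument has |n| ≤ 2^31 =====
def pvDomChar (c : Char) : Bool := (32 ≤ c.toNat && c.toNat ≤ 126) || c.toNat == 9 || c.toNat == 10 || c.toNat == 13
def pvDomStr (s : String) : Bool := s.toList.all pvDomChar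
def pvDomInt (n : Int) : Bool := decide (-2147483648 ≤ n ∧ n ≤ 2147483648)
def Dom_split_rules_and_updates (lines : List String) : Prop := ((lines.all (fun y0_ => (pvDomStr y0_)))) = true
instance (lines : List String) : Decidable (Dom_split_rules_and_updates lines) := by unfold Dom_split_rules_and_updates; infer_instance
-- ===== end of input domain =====

-- ===== PORT A =====
-- B splits the work into two independent filter passes with an explicit cutoff index
-- instead of A's single stateful loop with a flag (objective: simpler decomposition).
def pvLoopA : List String → List String → List String → Bool → List String × List String
  | [], rules, updates, _ => (rules, updates)
  | line :: rest, rules, updates, flag =>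
    if PySem.Str.isIn "|" line then
      pvLoopA rest (if flag then rules else rules ++ [line]) updates flag
    else if line == "" then
      pvLoopA rest rules updates flag
    else
      pvLoopA rest rules (updates ++ [line]) true

def split_rules_and_updates (lines : List String) : List String × List String :=
  pvLoopA lines [] [] false

-- ===== PORT B =====
def split_rules_and_updates_alt (lines : List String) : List String × List String :=
  let updates := lines.filter (fun l => !(l == "") && !(PySem.Str.isIn "|" l))
  let cut := lines.findIdx (fun l => !(l == "") && !(PySem.Str.isIn "|" l))
  let rules := (lines.take cut).filter (fun l => PySem.Str.isIn "|" l)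
  (rules, updates)

-- ===== PRECONDITION & SPEC =====
def Spec_split_rules_and_updates (lines : List String) (out : List String × List String) : Prop := out = split_rules_and_updates_alt lines
instance (lines : List String) (out : List String × List String) : Decidable (Spec_split_rules_and_updates lines out) := by unfold Spec_split_rules_and_updates; infer_instance

-- ===== CLAIM (what is proved, stated in full; the proofs are below) =====
def Claim_equal_split_rules_and_updates : Prop := ∀ (lines : List String), Dom_split_rules_and_updates lines → Spec_split_rules_and_updates lines (split_rules_and_updates lines)

-- ===== LEMMAS AND PROOFS =====

-- take-up-to-findIdx of the negated predicate is takeWhile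
theorem pv_take_findIdx {α : Type} (p : α → Bool) (xs : List α) :
    xs.take (xs.findIdx (fun x => !(p x))) = xs.takeWhile p := by
  induction xs with
  | nil => rfl
  | cons x rest ih =>
    cases h : p x <;> simp [List.findIdx_cons, h, ih]

-- invariant of A's loop
theorem pvLoopA_spec (lines rules updates : List String) (flag : Bool) :
    pvLoopA lines rules updates flag =
      (rules ++ (if flag then [] else
        (lines.takeWhile (fun l => l == "" || PySem.Str.isIn "|" l)).filter
          (fun l => PySem.Str.isIn "|" l)),
       updates ++ lines.filter (fun l => !(l == "") && !(PySem.Str.isIn "|" l))) := by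
  induction lines generalizing rules updates flag with
  | nil => cases flag <;> simp [pvLoopA]
  | cons line rest ih =>
    by_cases hb : PySem.Chars.isIn ['|'] line.toList = true
    · have hb2 : PySem.Str.isIn "|" line = true := by simpa using hb
      cases flag <;>
        simp [pvLoopA, hb, ih]
    · have hbf : PySem.Chars.isIn ['|'] line.toList = false := by
        simpa using hb
      have hb2 : PySem.Str.isIn "|" line = false := by simpa using hbf
      by_cases he : line = ""
      · subst he
        have h0 : PySem.Chars.isIn ['|'] ([] : List Char) = false := by decide
        cases flag <;> simp [pvLoopA, h0, ih]
      · have he' : (line == "") = false := by simpa using he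
        cases flag <;>
          simp [pvLoopA, hbf, he', ih]

-- ===== VERDICT (by name: the statement is the Claim_ definition above) =====
theorem split_rules_and_updates_spec : Claim_equal_split_rules_and_updates := by
  intro lines _
  unfold Spec_split_rules_and_updates split_rules_and_updates
  rw [pvLoopA_spec]
  have key : List.take (List.findIdx
        (fun l : String => !(l == "") && !(PySem.Chars.isIn ['|'] l.toList)) lines) lines
      = List.takeWhile (fun l : String => l == "" || PySem.Chars.isIn ['|'] l.toList) lines := by
    simpa [Bool.not_or] using
      pv_take_findIdx (fun l : String => l == "" || PySem.Chars.isIn ['|'] l.toList) lines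
  simp [split_rules_and_updates_alt, key]
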